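-- pv_equiv track=rewrite | github.com/henrychen222/Leetcode | String/1234_M_ReplaceSubstringBalancedString.py | balancedString2
-- ===== SOURCE A (Python) =====
-- def balancedString2(s: str) -> int:
--     c = {'Q': 0, 'W': 1, 'E': 2, 'R': 3}
--     d = [0 for i in range(4)]
--     for ch in s:
--         d[c[ch]] += 1
--     t = len(s) // 4
--     for i in range(len(d)):
--         d[i] -= t
--     dp = [0 for i in range(len(s))]
--     d2 = [0 for i in range(4)]
--     i = 0
--     while i < len(s):
--         if d2[0] >= d[0] and d2[1] >= d[1] and d2[2] >= d[2] and d2[3] >= d[3]: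
--             break
--         else:
--             d2[c[s[i]]] += 1
--         i += 1
--     if i < 2:
--         return i
--     dp[0] = i
--     minv = i
--     for i in range(1, len(s)):
--         d2[c[s[i-1]]] -= 1
--         j = i + dp[i-1] - 1
--         flag = False
--         while j < len(s):
--             if d2[0] >= d[0] and d2[1] >= d[1] and d2[2] >= d[2] and d2[3] >= d[3]:
--                 flag = True
--                 break
--             else:
--                 d2[c[s[j]]] += 1
--             j += 1
--         if not flag and not(d2[0] >= d[0] and d2[1] >= d[1] and d2[2] >= d[2] and d2[3] >= d[3]):
--             break
--         dp[i] = j - i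
--         minv = min(minv, dp[i])
--     return minv
-- ===== SOURCE B (Python) =====
-- def balancedString2(s: str) -> int:
--     # Canonical one-pass sliding window (grow right, shrink left), single loop.
--     c = {'Q': 0, 'W': 1, 'E': 2, 'R': 3}
--     need = [-(len(s) // 4)] * 4
--     for ch in s:
--         need[c[ch]] += 1
--     if all(x <= 0 for x in need):
--         return 0
--     best = len(s)
--     win = [0] * 4
--     left = 0
--     for right in range(len(s)):
--         win[c[s[right]]] += 1
--         while win[0] >= need[0] and win[1] >= need[1] and win[2] >= need[2] and win[3] >= need[3]:
--             best = min(best, right + 1 - left)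
--             win[c[s[left]]] -= 1
--             left += 1
--     return best
-- ===== Notes on version B (the rewrite author's own statement) =====
-- stated objective: simpler
-- what changed: Replaced A's per-start scan with a dp array of window lengths and an early-break chain by the canonical grow-right/shrink-left sliding window with a single running minimum.
import Mathlib
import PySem

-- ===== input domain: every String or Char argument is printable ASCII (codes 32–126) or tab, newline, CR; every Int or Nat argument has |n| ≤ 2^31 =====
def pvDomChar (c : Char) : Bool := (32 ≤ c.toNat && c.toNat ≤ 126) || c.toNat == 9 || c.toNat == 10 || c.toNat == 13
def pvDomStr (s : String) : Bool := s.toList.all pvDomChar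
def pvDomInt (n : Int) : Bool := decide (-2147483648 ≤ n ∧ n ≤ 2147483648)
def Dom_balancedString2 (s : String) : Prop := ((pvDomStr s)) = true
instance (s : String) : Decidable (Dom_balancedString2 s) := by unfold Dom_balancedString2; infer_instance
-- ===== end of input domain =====

-- B replaces A's per-start scan (dp array of window lengths, resumed right pointer, early-break
-- chain) by the canonical grow-right/shrink-left sliding window with one running minimum;
-- same cost class, simpler single loop.

-- ===== PORT A =====
-- the dict c = {'Q':0,'W':1,'E':2,'R':3}; both Pythons index their 4-counter arrays through it.
-- (KeyError on any other character is excluded by Pre_; the port defaults those to class 0.)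
def cIdx (ch : Char) : Nat :=
  if ch = 'Q' then 0 else if ch = 'W' then 1 else if ch = 'E' then 2
  else if ch = 'R' then 3 else 0

-- d[k] += 1 / d[k] -= 1 on a Python 4-element list
def bump (d : List Int) (k : Nat) : List Int := d.set k (d.getD k 0 + 1)
def decr (d : List Int) (k : Nat) : List Int := d.set k (d.getD k 0 - 1)

-- the repeated test 'd2[0] >= d[0] and … and d2[3] >= d[3]'
def condA (d d2 : List Int) : Bool :=
  (d.getD 0 0 ≤ d2.getD 0 0) && (d.getD 1 0 ≤ d2.getD 1 0) &&
  (d.getD 2 0 ≤ d2.getD 2 0) && (d.getD 3 0 ≤ d2.getD 3 0)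

-- first 'while i < len(s)' loop: returns (i, d2); fuel = len(s) - i makes it total
def loop1A (l : List Char) (d : List Int) : Nat → Nat → List Int → Nat × List Int
  | 0, i, d2 => (i, d2)
  | fuel + 1, i, d2 =>
    if i < l.length then
      if condA d d2 then (i, d2)
      else loop1A l d fuel (i + 1) (bump d2 (cIdx (l.getD i 'Q')))
    else (i, d2)

-- inner 'while j < len(s)' loop: returns (j, d2, flag); fuel = len(s) - j
def loop3A (l : List Char) (d : List Int) : Nat → Nat → List Int → Nat × List Int × Bool
  | 0, j, d2 => (j, d2, false)
  | fuel + 1, j, d2 =>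
    if j < l.length then
      if condA d d2 then (j, d2, true)
      else loop3A l d fuel (j + 1) (bump d2 (cIdx (l.getD j 'Q')))
    else (j, d2, false)

-- 'for i in range(1, len(s))' with its break; state (i, d2, dp, minv); fuel = len(s) - i
def loop2A (l : List Char) (d : List Int) : Nat → Nat → List Int → List Nat → Nat → Nat
  | 0, _, _, _, minv => minv
  | fuel + 1, i, d2, dp, minv =>
    if i < l.length then
      let d2a := decr d2 (cIdx (l.getD (i - 1) 'Q'))
      let j0 := i + dp.getD (i - 1) 0 - 1
      let r := loop3A l d (l.length - j0) j0 d2a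
      if !r.2.2 && !condA d r.2.1 then minv
      else
        let dpv := r.1 - i
        loop2A l d fuel (i + 1) r.2.1 (dp.set i dpv) (min minv dpv)
    else minv

def balancedString2 (s : String) : Int :=
  let l := s.toList
  let n := l.length
  let d1 := l.foldl (fun d ch => bump d (cIdx ch)) [0, 0, 0, 0]
  let t : Int := ((n / 4 : Nat) : Int)
  let d := (List.range 4).foldl (fun dd i => dd.set i (dd.getD i 0 - t)) d1
  let r1 := loop1A l d n 0 [0, 0, 0, 0]
  if r1.1 < 2 then (r1.1 : Int)
  else
    let dp := (List.replicate n (0 : Nat)).set 0 r1.1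
    (loop2A l d (n - 1) 1 r1.2 dp r1.1 : Int)

-- ===== PORT B =====
-- 'while win[0] >= need[0] and …': shrink the window from the left; fuel = right + 1 - left
def shrinkB (l : List Char) (need : List Int) : Nat → Nat → Nat → List Int → Nat → Nat × List Int × Nat
  | 0, _, left, win, best => (best, win, left)
  | fuel + 1, right, left, win, best =>
    if condA need win then
      shrinkB l need fuel right (left + 1) (decr win (cIdx (l.getD left 'Q')))
        (min best (right + 1 - left))
    else (best, win, left)

-- 'for right in range(len(s))': state (best, win, left); fuel = len(s) - right
def loopB (l : List Char) (need : List Int) : Nat → Nat → Nat × List Int × Nat → Nat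
  | 0, _, st => st.1
  | fuel + 1, right, st =>
    if right < l.length then
      loopB l need fuel (right + 1)
        (shrinkB l need (right + 1 - st.2.2) right st.2.2 (bump st.2.1 (cIdx (l.getD right 'Q'))) st.1)
    else st.1

def balancedString2_alt (s : String) : Int :=
  let l := s.toList
  let q : Int := ((l.length / 4 : Nat) : Int)
  let need := l.foldl (fun a ch => bump a (cIdx ch)) [-q, -q, -q, -q]
  if need.all (· ≤ 0) then 0
  else (loopB l need l.length 0 (l.length, [0, 0, 0, 0], 0) : Int)

-- ===== PRECONDITION & SPEC =====
-- Pre_ excludes exactly the strings with a character outside {'Q','W','E','R'}, on which both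
-- Pythons raise KeyError at the dict lookup c[ch].
def Pre_balancedString2 (s : String) : Prop :=
  (s.toList.all (fun ch => ch == 'Q' || ch == 'W' || ch == 'E' || ch == 'R')) = true
instance (s : String) : Decidable (Pre_balancedString2 s) := by
  unfold Pre_balancedString2; infer_instance
def pvWitness_balancedString2 : String := "QQWE"

def Spec_balancedString2 (s : String) (out : Int) : Prop := out = balancedString2_alt s
instance (s : String) (out : Int) : Decidable (Spec_balancedString2 s out) := by
  unfold Spec_balancedString2; infer_instance

-- ===== CLAIM (what is proved, stated in full; the proofs are below) =====
def Claim_equal_balancedString2 : Prop :=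
  ∀ (s : String), Dom_balancedString2 s → Pre_balancedString2 s →
    Spec_balancedString2 s (balancedString2 s)

-- ===== LEMMAS AND PROOFS =====
-- proof-side notions
def tcnt (l : List Char) (k : Nat) : Int := (l.countP (fun ch => cIdx ch == k) : Int)
def pcnt (l : List Char) (k m : Nat) : Int := tcnt (l.take m) k
def tQ (l : List Char) : Int := ((l.length / 4 : Nat) : Int)
def Valid (l : List Char) (a b : Nat) : Prop :=
  ∀ k, k < 4 → tcnt l k - tQ l ≤ pcnt l k b - pcnt l k a
def needL (l : List Char) : List Int :=
  [tcnt l 0 - tQ l, tcnt l 1 - tQ l, tcnt l 2 - tQ l, tcnt l 3 - tQ l]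
def wl (l : List Char) (a b : Nat) : List Int :=
  [pcnt l 0 b - pcnt l 0 a, pcnt l 1 b - pcnt l 1 a,
   pcnt l 2 b - pcnt l 2 a, pcnt l 3 b - pcnt l 3 a]
def Sset (l : List Char) : Set ℕ := {L | ∃ a, a + L ≤ l.length ∧ Valid l a (a + L)}

lemma cIdx_cases (ch : Char) : cIdx ch = 0 ∨ cIdx ch = 1 ∨ cIdx ch = 2 ∨ cIdx ch = 3 := by
  unfold cIdx; split_ifs <;> simp

lemma pcnt_zero (l : List Char) (k : Nat) : pcnt l k 0 = 0 := by simp [pcnt, tcnt]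

lemma pcnt_succ (l : List Char) (k : Nat) {b : Nat} (h : b < l.length) :
    pcnt l k (b + 1) = pcnt l k b + (if cIdx l[b] = k then 1 else 0) := by
  simp only [pcnt, tcnt, List.take_add_one, List.getElem?_eq_getElem h, Option.toList_some,
    List.countP_append, List.countP_cons, List.countP_nil]
  push_cast
  split_ifs with h1 h2 h2 <;> simp_all

lemma pcnt_mono (l : List Char) (k : Nat) {a b : Nat} (h : a ≤ b) :
    pcnt l k a ≤ pcnt l k b := by
  simp only [pcnt, tcnt, Int.ofNat_le]
  have : l.take a = (l.take b).take a := by rw [List.take_take, Nat.min_eq_left h]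
  rw [this]
  exact_mod_cast (List.take_sublist a (l.take b)).countP_le
lemma pcnt_len (l : List Char) (k : Nat) : pcnt l k l.length = tcnt l k := by
  simp [pcnt]

lemma tQ_nonneg (l : List Char) : 0 ≤ tQ l := by unfold tQ; exact_mod_cast Nat.zero_le _

lemma valid_zero_len (l : List Char) : Valid l 0 l.length := by
  intro k hk
  rw [pcnt_len, pcnt_zero]
  have := tQ_nonneg l
  omega

lemma valid_mono_right (l : List Char) {a b b' : Nat} (h : b ≤ b') (hv : Valid l a b) :
    Valid l a b' := by
  intro k hk
  have := pcnt_mono l k h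
  have := hv k hk
  omega

lemma valid_anti_left (l : List Char) {a a' b : Nat} (h : a' ≤ a) (hv : Valid l a b) :
    Valid l a' b := by
  intro k hk
  have := pcnt_mono l k h
  have := hv k hk
  omega

lemma valid_diag (l : List Char) {a : Nat} : Valid l a a ↔ Valid l 0 0 := by
  constructor <;> intro hv k hk <;> have := hv k hk <;> omega

lemma wl_diag (l : List Char) (a : Nat) : wl l a a = [0, 0, 0, 0] := by
  simp [wl]

lemma cond_iff (l : List Char) (a b : Nat) :
    condA (needL l) (wl l a b) = true ↔ Valid l a b := by
  simp only [condA, needL, wl, List.getD, List.getElem?_cons_zero, List.getElem?_cons_succ,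
    Option.getD_some, Bool.and_eq_true, decide_eq_true_eq]
  constructor
  · rintro ⟨⟨⟨h0, h1⟩, h2⟩, h3⟩ k hk
    interval_cases k <;> assumption
  · intro h
    exact ⟨⟨⟨h 0 (by omega), h 1 (by omega)⟩, h 2 (by omega)⟩, h 3 (by omega)⟩

lemma bump_wl (l : List Char) (a : Nat) {b : Nat} (h : b < l.length) :
    bump (wl l a b) (cIdx l[b]) = wl l a (b + 1) := by
  rcases cIdx_cases l[b] with h0 | h0 | h0 | h0 <;>
  · rw [h0]
    simp [bump, wl, List.set, List.getD, pcnt_succ _ _ h, h0]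
    omega

lemma decr_wl (l : List Char) {a : Nat} (b : Nat) (h : a < l.length) :
    decr (wl l a b) (cIdx l[a]) = wl l (a + 1) b := by
  rcases cIdx_cases l[a] with h0 | h0 | h0 | h0 <;>
  · rw [h0]
    simp [decr, wl, List.set, List.getD, pcnt_succ _ _ h, h0]
    omega
lemma count_fold (l : List Char) : ∀ x0 x1 x2 x3 : Int,
    l.foldl (fun d ch => bump d (cIdx ch)) [x0, x1, x2, x3] =
      [x0 + tcnt l 0, x1 + tcnt l 1, x2 + tcnt l 2, x3 + tcnt l 3] := by
  induction l with
  | nil => simp [tcnt]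
  | cons ch t ih =>
    intro x0 x1 x2 x3
    have hc : ∀ k, tcnt (ch :: t) k = tcnt t k + (if cIdx ch = k then 1 else 0) := by
      intro k
      simp only [tcnt, List.countP_cons]
      push_cast
      split_ifs with h1 h2 h2 <;> simp_all
    rw [List.foldl_cons]
    rcases cIdx_cases ch with h0 | h0 | h0 | h0
    · have hb : bump [x0, x1, x2, x3] (cIdx ch) = [x0 + 1, x1, x2, x3] := by
        simp [bump, h0, List.getD]
      rw [hb, ih]; simp only [hc, h0]; norm_num; omega
    · have hb : bump [x0, x1, x2, x3] (cIdx ch) = [x0, x1 + 1, x2, x3] := by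
        simp [bump, h0, List.getD]
      rw [hb, ih]; simp only [hc, h0]; norm_num; omega
    · have hb : bump [x0, x1, x2, x3] (cIdx ch) = [x0, x1, x2 + 1, x3] := by
        simp [bump, h0, List.getD]
      rw [hb, ih]; simp only [hc, h0]; norm_num; omega
    · have hb : bump [x0, x1, x2, x3] (cIdx ch) = [x0, x1, x2, x3 + 1] := by
        simp [bump, h0, List.getD]
      rw [hb, ih]; simp only [hc, h0]; norm_num; omega

lemma need_eq (l : List Char) :
    (List.range 4).foldl (fun dd i => dd.set i (dd.getD i 0 - ((l.length / 4 : Nat) : Int)))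
      (l.foldl (fun d ch => bump d (cIdx ch)) [0, 0, 0, 0]) = needL l := by
  rw [count_fold]
  have h4 : List.range 4 = [0, 1, 2, 3] := by decide
  simp [h4, List.set, List.getD, needL, tQ]

lemma needB_eq (l : List Char) :
    l.foldl (fun a ch => bump a (cIdx ch))
      [-((l.length / 4 : Nat) : Int), -((l.length / 4 : Nat) : Int),
       -((l.length / 4 : Nat) : Int), -((l.length / 4 : Nat) : Int)] = needL l := by
  rw [count_fold]
  simp only [needL, tQ]
  norm_num
  omega

lemma need_all_iff (l : List Char) :
    (needL l).all (· ≤ 0) = true ↔ Valid l 0 0 := by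
  simp only [needL, List.all_cons, List.all_nil, Bool.and_eq_true, decide_eq_true_eq,
    Valid, pcnt_zero]
  constructor
  · rintro ⟨h0, h1, h2, h3, -⟩ k hk
    interval_cases k <;> omega
  · intro h
    have h0 := h 0 (by omega); have h1 := h 1 (by omega)
    have h2 := h 2 (by omega); have h3 := h 3 (by omega)
    exact ⟨by omega, by omega, by omega, by omega, trivial⟩
lemma loop3_spec (l : List Char) (i : Nat) : ∀ (fuel j : Nat) (d2 : List Int),
    d2 = wl l i j → j ≤ l.length → l.length - j ≤ fuel →
    ∃ r, loop3A l (needL l) fuel j d2 = (r, wl l i r, decide (r < l.length)) ∧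
      j ≤ r ∧ r ≤ l.length ∧ (r < l.length → Valid l i r) ∧
      (∀ c, j ≤ c → c < r → ¬ Valid l i c) := by
  intro fuel
  induction fuel with
  | zero =>
    intro j d2 hd hj hf
    subst hd
    have hj' : j = l.length := by omega
    refine ⟨j, ?_, le_refl j, by omega, by omega, by omega⟩
    simp [loop3A, hj']
  | succ fuel ih =>
    intro j d2 hd hj hf
    subst hd
    by_cases hjn : j < l.length
    · rcases hcond : condA (needL l) (wl l i j) with _ | _
      · have hnv : ¬ Valid l i j := by
          rw [← cond_iff l i j]; simp [hcond]
        have hbump : bump (wl l i j) (cIdx (l.getD j 'Q')) = wl l i (j + 1) := by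
          rw [List.getD_eq_getElem l 'Q' hjn, bump_wl l i hjn]
        obtain ⟨r, heq, hjr, hrl, hrv, hrm⟩ :=
          ih (j + 1) (wl l i (j + 1)) rfl (by omega) (by omega)
        refine ⟨r, ?_, by omega, hrl, hrv, ?_⟩
        · rw [loop3A, if_pos hjn, if_neg (by simp [hcond]), hbump]
          exact heq
        · intro c hc1 hc2
          rcases Nat.eq_or_lt_of_le hc1 with rfl | hlt
          · exact hnv
          · exact hrm c hlt hc2
      · have hv : Valid l i j := by rw [← cond_iff l i j]; simp [hcond]
        refine ⟨j, ?_, le_refl j, by omega, fun _ => hv, by omega⟩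
        rw [loop3A, if_pos hjn, if_pos hcond]
        simp [hjn]
    · have hj' : j = l.length := by omega
      refine ⟨j, ?_, le_refl j, by omega, by omega, by omega⟩
      rw [loop3A, if_neg hjn]
      simp [hj']

lemma loop1_spec (l : List Char) : ∀ (fuel j : Nat) (d2 : List Int),
    d2 = wl l 0 j → j ≤ l.length → l.length - j ≤ fuel → (∀ c, c < j → ¬ Valid l 0 c) →
    ∃ r, loop1A l (needL l) fuel j d2 = (r, wl l 0 r) ∧
      j ≤ r ∧ r ≤ l.length ∧ Valid l 0 r ∧ (∀ c, c < r → ¬ Valid l 0 c) := by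
  intro fuel
  induction fuel with
  | zero =>
    intro j d2 hd hj hf hmin
    subst hd
    have hj' : j = l.length := by omega
    exact ⟨j, by simp [loop1A], le_refl j, by omega,
      by rw [hj']; exact valid_zero_len l, hmin⟩
  | succ fuel ih =>
    intro j d2 hd hj hf hmin
    subst hd
    by_cases hjn : j < l.length
    · rcases hcond : condA (needL l) (wl l 0 j) with _ | _
      · have hnv : ¬ Valid l 0 j := by
          rw [← cond_iff l 0 j]; simp [hcond]
        have hbump : bump (wl l 0 j) (cIdx (l.getD j 'Q')) = wl l 0 (j + 1) := by
          rw [List.getD_eq_getElem l 'Q' hjn, bump_wl l 0 hjn]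
        obtain ⟨r, heq, hjr, hrl, hrv, hrm⟩ :=
          ih (j + 1) (wl l 0 (j + 1)) rfl (by omega) (by omega)
            (by intro c hc
                rcases Nat.lt_succ_iff_lt_or_eq.mp hc with h | rfl
                · exact hmin c h
                · exact hnv)
        refine ⟨r, ?_, by omega, hrl, hrv, hrm⟩
        rw [loop1A, if_pos hjn, if_neg (by simp [hcond]), hbump]
        exact heq
      · have hv : Valid l 0 j := by rw [← cond_iff l 0 j]; simp [hcond]
        exact ⟨j, by rw [loop1A, if_pos hjn, if_pos hcond], le_refl j, by omega, hv, hmin⟩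
    · have hj' : j = l.length := by omega
      refine ⟨j, ?_, le_refl j, by omega, by rw [hj']; exact valid_zero_len l, hmin⟩
      rw [loop1A, if_neg hjn]
lemma minv_eq_sInf (l : List Char) (m minv : Nat)
    (hcut : ∀ a L, a + L ≤ l.length → Valid l a (a + L) → a ≤ m)
    (hlb : ∀ a L, a ≤ m → a + L ≤ l.length → Valid l a (a + L) → minv ≤ L)
    (hwit : ∃ a L, a ≤ m ∧ a + L ≤ l.length ∧ Valid l a (a + L) ∧ minv = L) :
    minv = sInf (Sset l) := by
  have hne : (Sset l).Nonempty := ⟨l.length, 0, by omega, by simpa using valid_zero_len l⟩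
  apply le_antisymm
  · apply le_csInf hne
    rintro L ⟨a, haL, hv⟩
    exact hlb a L (hcut a L haL hv) haL hv
  · obtain ⟨a, L, _, haL, hv, rfl⟩ := hwit
    exact Nat.sInf_le ⟨a, haL, hv⟩

lemma loop2_spec (l : List Char) (hex : ¬ Valid l 0 0) :
    ∀ (fuel i : Nat) (d2 : List Int) (dp : List Nat) (minv : Nat),
    1 ≤ i → i ≤ l.length → l.length - i ≤ fuel → dp.length = l.length →
    (∃ J, i ≤ J ∧ J ≤ l.length ∧ d2 = wl l (i - 1) J ∧ dp.getD (i - 1) 0 = J - (i - 1) ∧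
      (J < l.length → Valid l (i - 1) J) ∧ (∀ c, i - 1 ≤ c → c < J → ¬ Valid l (i - 1) c)) →
    (∀ a L, a ≤ i - 1 → a + L ≤ l.length → Valid l a (a + L) → minv ≤ L) →
    (∃ a L, a ≤ i - 1 ∧ a + L ≤ l.length ∧ Valid l a (a + L) ∧ minv = L) →
    loop2A l (needL l) fuel i d2 dp minv = sInf (Sset l) := by
  intro fuel
  induction fuel with
  | zero =>
    intro i d2 dp minv hi1 hilen hfuel hdplen hJ hlb hwit
    have hieq : i = l.length := by omega
    rw [loop2A]
    refine minv_eq_sInf l (i - 1) minv ?_ hlb hwit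
    intro a L haL hv
    by_contra hgt
    have ha : a = l.length := by omega
    have hL : L = 0 := by omega
    rw [ha, hL] at hv
    exact hex ((valid_diag l).mp hv)
  | succ fuel ih =>
    intro i d2 dp minv hi1 hilen hfuel hdplen hJ hlb hwit
    by_cases hin : i < l.length
    · obtain ⟨J, hiJ, hJlen, hd2, hdp, hJv, hJm⟩ := hJ
      have hi1l : i - 1 < l.length := by omega
      have hdecr : decr d2 (cIdx (l.getD (i - 1) 'Q')) = wl l i J := by
        rw [hd2, List.getD_eq_getElem l 'Q' hi1l, decr_wl l J hi1l]
        congr 1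
        omega
      have hj0 : i + dp.getD (i - 1) 0 - 1 = J := by omega
      obtain ⟨r, heq3, hJr, hrlen, hrv, hrm⟩ :=
        loop3_spec l i (l.length - J) J (wl l i J) rfl hJlen (by omega)
      have hmin_i : ∀ c, i ≤ c → c < r → ¬ Valid l i c := by
        intro c hc1 hc2
        by_cases hcJ : c < J
        · intro hv
          exact hJm c (by omega) hcJ (valid_anti_left l (by omega) hv)
        · exact hrm c (by omega) hc2
      have hri : i + 1 ≤ r := by
        by_contra hcon
        have hreq : r = i := by omega
        rcases Nat.lt_or_ge r l.length with hrn | hrn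
        · have hvv := hrv hrn
          rw [hreq] at hvv
          exact hex ((valid_diag l).mp hvv)
        · omega
      rw [loop2A, if_pos hin]
      simp only [hdecr, hj0, heq3]
      by_cases hrn : r < l.length
      · have hVir : Valid l i r := hrv hrn
        simp only [hrn, decide_true, Bool.not_true, Bool.false_and, Bool.false_eq_true,
          if_false]
        refine ih (i + 1) (wl l i r) (dp.set i (r - i)) (min minv (r - i))
          (by omega) (by omega) (by omega) (by simp [hdplen])
          ⟨r, by omega, hrlen, rfl, ?_, fun _ => hVir, hmin_i⟩ ?_ ?_
        · rw [List.getD_eq_getElem _ _ (by simp [hdplen]; omega)]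
          simp [List.getElem_set_self]
        · intro a L haI haL hv
          by_cases hai : a ≤ i - 1
          · exact le_trans (Nat.min_le_left _ _) (hlb a L hai haL hv)
          · have ha : a = i := by omega
            subst ha
            have hLr : r - a ≤ L := by
              by_contra hLc
              exact hmin_i (a + L) (by omega) (by omega) hv
            exact le_trans (Nat.min_le_right _ _) hLr
        · rcases Nat.le_total minv (r - i) with hmc | hmc
          · obtain ⟨a, L, ha, haL, hv, hminv⟩ := hwit
            exact ⟨a, L, by omega, haL, hv, by omega⟩
          · refine ⟨i, r - i, le_refl i, by omega, ?_, by omega⟩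
            have : i + (r - i) = r := by omega
            rw [this]
            exact hVir
      · have hreq : r = l.length := by omega
        rcases hcond2 : condA (needL l) (wl l i r) with _ | _
        · have hnv : ¬ Valid l i r := by rw [← cond_iff l i r]; simp [hcond2]
          simp only [hrn, decide_false, Bool.not_false, Bool.true_and, if_pos]
          refine minv_eq_sInf l (i - 1) minv ?_ hlb hwit
          intro a L haL hv
          by_contra hgt
          have hvl : Valid l a l.length := valid_mono_right l haL hv
          have : Valid l i l.length := valid_anti_left l (by omega) hvl
          rw [hreq] at hnv
          exact hnv this
        · have hVir : Valid l i r := by rw [← cond_iff l i r]; simp [hcond2]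
          simp only [hrn, decide_false, Bool.not_false, Bool.true_and, Bool.not_true,
            Bool.false_eq_true, if_false]
          refine ih (i + 1) (wl l i r) (dp.set i (r - i)) (min minv (r - i))
            (by omega) (by omega) (by omega) (by simp [hdplen])
            ⟨r, by omega, hrlen, rfl, ?_, fun h => absurd h hrn, hmin_i⟩ ?_ ?_
          · rw [List.getD_eq_getElem _ _ (by simp [hdplen]; omega)]
            simp [List.getElem_set_self]
          · intro a L haI haL hv
            by_cases hai : a ≤ i - 1
            · exact le_trans (Nat.min_le_left _ _) (hlb a L hai haL hv)
            · have ha : a = i := by omega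
              subst ha
              have hLr : r - a ≤ L := by
                by_contra hLc
                exact hmin_i (a + L) (by omega) (by omega) hv
              exact le_trans (Nat.min_le_right _ _) hLr
          · rcases Nat.le_total minv (r - i) with hmc | hmc
            · obtain ⟨a, L, ha, haL, hv, hminv⟩ := hwit
              exact ⟨a, L, by omega, haL, hv, by omega⟩
            · refine ⟨i, r - i, le_refl i, by omega, ?_, by omega⟩
              have : i + (r - i) = r := by omega
              rw [this]
              exact hVir
    · rw [loop2A, if_neg hin]
      refine minv_eq_sInf l (i - 1) minv ?_ hlb hwit
      intro a L haL hv
      by_contra hgt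
      have ha : a = l.length := by omega
      have hL : L = 0 := by omega
      rw [ha, hL] at hv
      exact hex ((valid_diag l).mp hv)
lemma shrink_spec (l : List Char) (hex : ¬ Valid l 0 0) (right : Nat)
    (hrn : right < l.length) : ∀ (fuel left : Nat) (win : List Int) (best : Nat),
    win = wl l left (right + 1) → left ≤ right + 1 → right + 1 - left ≤ fuel →
    ∃ lf bf, shrinkB l (needL l) fuel right left win best = (bf, wl l lf (right + 1), lf) ∧
      left ≤ lf ∧ lf ≤ right + 1 ∧ ¬ Valid l lf (right + 1) ∧
      (∀ c, left ≤ c → c < lf → Valid l c (right + 1)) ∧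
      bf ≤ best ∧ (∀ a, left ≤ a → a < lf → bf ≤ right + 1 - a) ∧
      (bf = best ∨ ∃ a, left ≤ a ∧ a < lf ∧ bf = right + 1 - a) := by
  intro fuel
  induction fuel with
  | zero =>
    intro left win best hwin hl hf
    have hleq : left = right + 1 := by omega
    refine ⟨left, best, by simp [shrinkB, hwin], le_refl left, by omega, ?_, by omega,
      le_refl best, by omega, Or.inl rfl⟩
    rw [hleq]
    intro hv
    exact hex ((valid_diag l).mp hv)
  | succ fuel ih =>
    intro left win best hwin hl hf
    subst hwin
    rcases hcond : condA (needL l) (wl l left (right + 1)) with _ | _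
    · have hnv : ¬ Valid l left (right + 1) := by
        rw [← cond_iff l left (right + 1)]; simp [hcond]
      refine ⟨left, best, ?_, le_refl left, hl, hnv, by omega, le_refl best, by omega,
        Or.inl rfl⟩
      rw [shrinkB, if_neg (by simp [hcond])]
    · have hv : Valid l left (right + 1) := by
        rw [← cond_iff l left (right + 1)]; simp [hcond]
      have hlr : left < right + 1 := by
        rcases Nat.lt_or_ge left (right + 1) with h | h
        · exact h
        · have hleq : left = right + 1 := by omega
          rw [hleq] at hv
          exact absurd ((valid_diag l).mp hv) hex
      have hln : left < l.length := by omega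
      have hdecr : decr (wl l left (right + 1)) (cIdx (l.getD left 'Q')) =
          wl l (left + 1) (right + 1) := by
        rw [List.getD_eq_getElem l 'Q' hln, decr_wl l (right + 1) hln]
      obtain ⟨lf, bf, heq, hlf1, hlf2, hnv, hvr, hbf1, hbf2, hbf3⟩ :=
        ih (left + 1) (wl l (left + 1) (right + 1)) (min best (right + 1 - left))
          rfl (by omega) (by omega)
      refine ⟨lf, bf, ?_, by omega, hlf2, hnv, ?_, ?_, ?_, ?_⟩
      · rw [shrinkB, if_pos hcond, hdecr]
        exact heq
      · intro c hc1 hc2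
        rcases Nat.eq_or_lt_of_le hc1 with rfl | hlt
        · exact hv
        · exact hvr c hlt hc2
      · exact le_trans hbf1 (Nat.min_le_left _ _)
      · intro a ha1 ha2
        rcases Nat.eq_or_lt_of_le ha1 with rfl | hlt
        · exact le_trans hbf1 (Nat.min_le_right _ _)
        · exact hbf2 a hlt ha2
      · rcases hbf3 with hbf | ⟨a, ha1, ha2, ha3⟩
        · rcases Nat.le_total best (right + 1 - left) with hmc | hmc
          · exact Or.inl (by rw [hbf]; omega)
          · exact Or.inr ⟨left, le_refl left, by omega, by rw [hbf]; omega⟩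
        · exact Or.inr ⟨a, by omega, ha2, ha3⟩

lemma loopB_spec (l : List Char) (hex : ¬ Valid l 0 0) :
    ∀ (fuel b : Nat) (st : Nat × List Int × Nat),
    st.2.2 ≤ b → b ≤ l.length → l.length - b ≤ fuel →
    st.2.1 = wl l st.2.2 b →
    (∀ a, a < st.2.2 → Valid l a b) →
    (∀ a e, a ≤ e → e ≤ b → Valid l a e → st.1 ≤ e - a) →
    (st.1 = l.length ∨ ∃ a e, a ≤ e ∧ e ≤ b ∧ Valid l a e ∧ st.1 = e - a) →
    st.1 ≤ l.length →
    loopB l (needL l) fuel b st = sInf (Sset l) := by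
  intro fuel
  induction fuel with
  | zero =>
    intro b st hlb hblen hfuel hwin hvleft hI4 hI6 hI7
    have hbeq : b = l.length := by omega
    rw [loopB]
    refine minv_eq_sInf l l.length st.1 (fun a L haL hv => by omega) ?_ ?_
    · intro a L ha haL hv
      have := hI4 a (a + L) (by omega) (by omega) hv
      omega
    · rcases hI6 with h | ⟨a, e, hae, heb, hv, hst⟩
      · exact ⟨0, l.length, by omega, by omega, by simpa using valid_zero_len l, by omega⟩
      · refine ⟨a, e - a, by omega, by omega, ?_, hst⟩
        have : a + (e - a) = e := by omega
        rw [this]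
        exact hv
  | succ fuel ih =>
    intro b st hlb hblen hfuel hwin hvleft hI4 hI6 hI7
    obtain ⟨best, win, left⟩ := st
    simp only at hlb hwin hvleft hI4 hI6 hI7
    by_cases hbn : b < l.length
    · rw [loopB, if_pos hbn]
      have hf' : l.length - (b + 1) ≤ fuel := by omega
      have hb1 : b + 1 ≤ l.length := by omega
      have hbump : bump win (cIdx (l.getD b 'Q')) = wl l left (b + 1) := by
        rw [hwin, List.getD_eq_getElem l 'Q' hbn, bump_wl l left hbn]
      obtain ⟨lf, bf, heqS, hlf1, hlf2, hnv, hvr, hbf1, hbf2, hbf3⟩ :=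
        shrink_spec l hex b hbn (b + 1 - left) left (wl l left (b + 1)) best rfl
          (by omega) (by omega)
      simp only [hbump, heqS]
      have hbfn : bf ≤ l.length := le_trans hbf1 hI7
      refine ih (b + 1) (bf, wl l lf (b + 1), lf) hlf2 hb1 hf' rfl ?_ ?_ ?_ hbfn
      · intro a ha
        rcases Nat.lt_or_ge a left with h | h
        · exact valid_mono_right l (by omega) (hvleft a h)
        · exact hvr a h ha
      · intro a e hae heb hv
        rcases Nat.lt_or_ge e (b + 1) with he | he
        · have := hI4 a e hae (by omega) hv
          omega
        · have heeq : e = b + 1 := by omega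
          subst heeq
          rcases Nat.lt_or_ge a lf with half | half
          · rcases Nat.lt_or_ge a left with hal | hal
            · have := hI4 a b (by omega) (le_refl b) (hvleft a hal)
              omega
            · exact hbf2 a hal half
          · exact absurd (valid_anti_left l half hv) hnv
      · rcases hbf3 with hbf | ⟨a, ha1, ha2, ha3⟩
        · rcases hI6 with h | ⟨a, e, hae, heb, hv, hst⟩
          · exact Or.inl (by omega)
          · exact Or.inr ⟨a, e, hae, by omega, hv, by omega⟩
        · exact Or.inr ⟨a, b + 1, by omega, le_refl _, hvr a ha1 ha2, ha3⟩
    · have hbeq : b = l.length := by omega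
      rw [loopB, if_neg hbn]
      refine minv_eq_sInf l l.length best (fun a L haL hv => by omega) ?_ ?_
      · intro a L ha haL hv
        have := hI4 a (a + L) (by omega) (by omega) hv
        omega
      · rcases hI6 with h | ⟨a, e, hae, heb, hv, hst⟩
        · exact ⟨0, l.length, by omega, by omega, by simpa using valid_zero_len l, by omega⟩
        · refine ⟨a, e - a, by omega, by omega, ?_, hst⟩
          have : a + (e - a) = e := by omega
          rw [this]
          exact hv
lemma sInf_zero_of_balanced (l : List Char) (hv : Valid l 0 0) : sInf (Sset l) = 0 := by
  have h0 : (0 : ℕ) ∈ Sset l := ⟨0, by omega, by simpa using hv⟩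
  have := Nat.sInf_le h0
  omega

lemma portA_eq (s : String) : balancedString2 s = ((sInf (Sset s.toList) : ℕ) : Int) := by
  unfold balancedString2
  simp only [need_eq s.toList]
  obtain ⟨F, heq1, h0F, hFlen, hFv, hFm⟩ :=
    loop1_spec s.toList s.toList.length 0 [0, 0, 0, 0] (wl_diag s.toList 0).symm
      (by omega) (by omega) (by omega)
  rw [heq1]
  by_cases hF2 : F < 2
  · rw [if_pos hF2]
    interval_cases F
    · have h0 := sInf_zero_of_balanced s.toList hFv
      omega
    · have hex : ¬ Valid s.toList 0 0 := hFm 0 (by omega)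
      have h1 : (1 : ℕ) ∈ Sset s.toList := ⟨0, by omega, by simpa using hFv⟩
      have hle := Nat.sInf_le h1
      obtain ⟨a, haL, hv⟩ := Nat.sInf_mem (⟨1, h1⟩ : (Sset s.toList).Nonempty)
      have hnz : sInf (Sset s.toList) ≠ 0 := by
        intro h0
        rw [h0] at hv
        exact hex ((valid_diag s.toList).mp (by simpa using hv))
      omega
  · rw [if_neg hF2]
    have hex : ¬ Valid s.toList 0 0 := hFm 0 (by omega)
    have hdp : ((List.replicate s.toList.length (0 : Nat)).set 0 F).getD 0 0 = F := by
      rw [List.getD_eq_getElem _ _ (by simp only [List.length_set, List.length_replicate]; omega)]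
      simp [List.getElem_set_self]
    have hlbF : ∀ a L, a ≤ 1 - 1 → a + L ≤ s.toList.length → Valid s.toList a (a + L) →
        F ≤ L := by
      intro a L ha haL hv
      have ha0 : a = 0 := by omega
      subst ha0
      by_contra hLc
      exact hFm (0 + L) (by omega) (by simpa using hv)
    have hwitF : ∃ a L, a ≤ 1 - 1 ∧ a + L ≤ s.toList.length ∧ Valid s.toList a (a + L) ∧
        F = L := ⟨0, F, by omega, by simpa using hFlen, by simpa using hFv, rfl⟩
    have h2 := loop2_spec s.toList hex (s.toList.length - 1) 1 (wl s.toList 0 F)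
      ((List.replicate s.toList.length (0 : Nat)).set 0 F) F (by omega) (by omega)
      (by omega) (by simp)
      ⟨F, by omega, hFlen, rfl, by simpa using hdp, fun _ => hFv, by simpa using hFm⟩
      hlbF hwitF
    rw [h2]
lemma portB_eq (s : String) : balancedString2_alt s = ((sInf (Sset s.toList) : ℕ) : Int) := by
  unfold balancedString2_alt
  simp only [needB_eq s.toList]
  rcases hall : (needL s.toList).all (· ≤ 0) with _ | _
  · rw [if_neg (by simp)]
    have hex : ¬ Valid s.toList 0 0 := by
      rw [← need_all_iff s.toList]
      simp [hall]
    have hI4' : ∀ a e, a ≤ e → e ≤ 0 → Valid s.toList a e → s.toList.length ≤ e - a := by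
      intro a e hae heb hv
      have hae0 : a = 0 ∧ e = 0 := by omega
      rw [hae0.1, hae0.2] at hv
      exact absurd hv hex
    have hI5' : ∀ a, a < (s.toList.length, ([0, 0, 0, 0] : List Int), 0).2.2 →
        Valid s.toList a 0 := by
      intro a ha
      simp at ha
    rw [loopB_spec s.toList hex s.toList.length 0
      (s.toList.length, [0, 0, 0, 0], 0) (le_refl 0) (Nat.zero_le _) (by omega)
      (by simpa using (wl_diag s.toList 0).symm) hI5' hI4' (Or.inl rfl) (le_refl _)]
  · rw [if_pos rfl]
    have hv : Valid s.toList 0 0 := (need_all_iff s.toList).mp hall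
    rw [sInf_zero_of_balanced s.toList hv]
    simp

-- ===== VERDICT (by name: the statement is the Claim_ definition above) =====
theorem balancedString2_spec : Claim_equal_balancedString2 := by
  intro s _ _
  unfold Spec_balancedString2
  rw [portA_eq, portB_eq]
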